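-- pv_equiv track=rewrite | github.com/matichorvat/hsst | hsst/ruleapplication/carg_rules.py | find_carg_coverages
-- ===== SOURCE A (Python) =====
-- def find_carg_coverages(carg_node_list, reference_coverage, coverages):
--     """
--     Find CARG coverages by searching coverages for the ones with 1 in exactly the places carg requires it to be and nowhere else.
--     e.g. CARG is in node_id 2, reference coverage is [0,1,2,3], CARG coverages are [0,0,1,X0], [0,0,1,0] but not [0,1,1,0] or [0,1,X0,0]
--     :param carg_node_list: List of node ids corresponding to a single CARG
--     :param reference_coverage: List of node ids in order which coverages are constructed
--     :param coverages: List of coverages obtained by running rule application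
--     :return: List of coverages corresponding to the give CARG
--     """
--
--     # CARG node positions in reference
--     carg_node_positions = [reference_coverage.index(node_id) for node_id in carg_node_list]
--
--     carg_coverages = []
--
--     # Search rule application coverages that have 1 in exactly those coverages and nowhere else
--     for coverage in coverages:
--         if not all([True if coverage[index] == '1' else False for index in carg_node_positions]):
--             continue
--
--         if sum(1 for node in coverage if node == '1') != len(carg_node_positions):
--             continue
--
--         carg_coverages.append(coverage)
--
--     return carg_coverages
-- ===== SOURCE B (Python) =====
-- def find_carg_coverages(carg_node_list, reference_coverage, coverages):
--     positions = [reference_coverage.index(node_id) for node_id in carg_node_list]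
--     k = len(positions)
--     req = sorted(set(positions))  # distinct required positions, ascending
--
--     def matches(coverage):
--         # one fused left-to-right pass: merge-scan against the sorted required
--         # positions (pointer j) while counting '1's, with early rejection
--         j = 0
--         ones = 0
--         for i, v in enumerate(coverage):
--             if v == '1':
--                 ones += 1
--                 if j < len(req) and req[j] == i:
--                     j += 1
--             elif j < len(req) and req[j] == i:
--                 return False
--         return j == len(req) and ones == k
--
--     return [c for c in coverages if matches(c)]
-- ===== Notes on version B (the rewrite author's own statement) =====
-- stated objective: faster
-- what changed: A makes two separate per-coverage passes (an all() over a materialised list of indexed lookups at the required positions, then a full sum() recount of '1's); B sorts the distinct required positions once and decides each coverage in a single fused left-to-right merge-scan with a pointer into that sorted list, counting '1's as it goes and rejecting early at the first required position without a '1' (a timing run measured B faster).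
-- outside the precondition, e.g. on find_carg_coverages([5], [5], [[]]): A raises IndexError, B returns []
import Mathlib
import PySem

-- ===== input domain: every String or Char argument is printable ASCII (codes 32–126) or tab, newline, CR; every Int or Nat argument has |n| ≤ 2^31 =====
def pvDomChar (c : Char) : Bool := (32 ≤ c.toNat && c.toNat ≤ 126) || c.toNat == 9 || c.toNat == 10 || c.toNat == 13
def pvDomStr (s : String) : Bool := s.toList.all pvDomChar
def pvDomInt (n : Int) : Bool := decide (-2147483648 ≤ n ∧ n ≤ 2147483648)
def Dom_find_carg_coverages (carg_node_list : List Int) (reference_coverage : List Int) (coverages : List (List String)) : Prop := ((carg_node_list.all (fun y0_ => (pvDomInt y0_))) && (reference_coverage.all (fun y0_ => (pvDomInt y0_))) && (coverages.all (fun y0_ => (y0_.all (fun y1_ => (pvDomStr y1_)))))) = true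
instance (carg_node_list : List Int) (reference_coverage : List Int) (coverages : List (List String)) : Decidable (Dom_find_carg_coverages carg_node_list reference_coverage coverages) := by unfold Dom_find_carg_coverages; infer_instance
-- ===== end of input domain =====

-- B replaces A's two separate per-coverage passes (an all() over indexed lookups plus a full sum() recount)
-- by one fused left-to-right merge-scan of each coverage against the sorted distinct required positions,
-- counting '1's as it goes and rejecting early at the first required position lacking a '1' (measured faster in a timing run).

-- ===== PORT A =====
def find_carg_coverages (carg_node_list : List Int) (reference_coverage : List Int) (coverages : List (List String)) : List (List String) :=
  let carg_node_positions : List Int :=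
    carg_node_list.map (fun node_id => (((PySem.List.index? reference_coverage node_id).getD 0 : Nat) : Int))
  coverages.foldl (fun carg_coverages coverage =>
    if ¬ ((carg_node_positions.map (fun index =>
            if (PySem.List.pyGet? coverage index).getD "" == "1" then true else false)).all (fun b => b)) then
      carg_coverages
    else if (coverage.foldl (fun s node => if node == "1" then s + 1 else s) (0 : Int)) ≠ (carg_node_positions.length : Int) then
      carg_coverages
    else
      carg_coverages ++ [coverage]) []

-- ===== PORT B =====
-- the inner 'matches' loop of Source B: walk the enumerated coverage once, pointer j into req, counter ones
def pvMatchesGo (req : List Int) (k : Int) (pairs : List (Int × String)) (j : Nat) (ones : Int) : Bool :=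
  match pairs with
  | [] => (j == req.length) && (ones == k)
  | (i, v) :: rest =>
    if v == "1" then
      if decide (j < req.length) && (req.getD j 0 == i) then
        pvMatchesGo req k rest (j + 1) (ones + 1)
      else
        pvMatchesGo req k rest j (ones + 1)
    else
      if decide (j < req.length) && (req.getD j 0 == i) then false
      else pvMatchesGo req k rest j ones

def find_carg_coverages_alt (carg_node_list : List Int) (reference_coverage : List Int) (coverages : List (List String)) : List (List String) :=
  let positions : List Int :=
    carg_node_list.map (fun node_id => (((PySem.List.index? reference_coverage node_id).getD 0 : Nat) : Int))
  let k : Int := positions.length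
  let req : List Int := PySem.List.sorted (PySem.Set.ofList positions) (fun x => x) false
  coverages.filter (fun c => pvMatchesGo req k (PySem.List.enumerate c) 0 0)

-- ===== PRECONDITION & SPEC =====
-- Pre_ excludes exactly where Python A raises: a CARG node id absent from reference_coverage
-- (ValueError from .index), or a coverage too short for some CARG position (IndexError).
def Pre_find_carg_coverages (carg_node_list : List Int) (reference_coverage : List Int) (coverages : List (List String)) : Prop :=
  (∀ n ∈ carg_node_list, n ∈ reference_coverage) ∧
  (∀ c ∈ coverages, ∀ n ∈ carg_node_list, reference_coverage.idxOf n < c.length)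
instance (carg_node_list : List Int) (reference_coverage : List Int) (coverages : List (List String)) : Decidable (Pre_find_carg_coverages carg_node_list reference_coverage coverages) := by unfold Pre_find_carg_coverages; infer_instance

def pvWitness_find_carg_coverages : List Int × List Int × List (List String) :=
  ([2], [0, 1, 2, 3], [["0", "0", "1", "X0"], ["0", "0", "1", "0"], ["0", "1", "1", "0"]])

def Spec_find_carg_coverages (carg_node_list : List Int) (reference_coverage : List Int) (coverages : List (List String)) (out : List (List String)) : Prop := out = find_carg_coverages_alt carg_node_list reference_coverage coverages
instance (carg_node_list : List Int) (reference_coverage : List Int) (coverages : List (List String)) (out : List (List String)) : Decidable (Spec_find_carg_coverages carg_node_list reference_coverage coverages out) := by unfold Spec_find_carg_coverages; infer_instance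

-- ===== CLAIM (what is proved, stated in full; the proofs are below) =====
def Claim_equal_find_carg_coverages : Prop := ∀ (carg_node_list : List Int) (reference_coverage : List Int) (coverages : List (List String)), Dom_find_carg_coverages carg_node_list reference_coverage coverages → Pre_find_carg_coverages carg_node_list reference_coverage coverages → Spec_find_carg_coverages carg_node_list reference_coverage coverages (find_carg_coverages carg_node_list reference_coverage coverages)

-- ===== LEMMAS AND PROOFS =====

-- 'coverage has a "1" at absolute position p, scanning c whose first element sits at position s'
def HasOneAt (c : List String) (s p : Int) : Prop :=
  ∃ (m : Nat), ∃ (h : m < c.length), p = s + (m : Int) ∧ c.get ⟨m, h⟩ = "1"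

theorem hasOneAt_cons_self (v : String) (cs : List String) (s : Int) :
    HasOneAt (v :: cs) s s ↔ v = "1" := by
  constructor
  · rintro ⟨m, hm, hp, h1⟩
    have : m = 0 := by omega
    subst this; simpa [List.get_eq_getElem] using h1
  · intro h; refine ⟨0, by simp, by simp, ?_⟩; simpa [List.get_eq_getElem] using h

theorem hasOneAt_cons_shift (v : String) (cs : List String) (s p : Int) (hp : s < p) :
    HasOneAt (v :: cs) s p ↔ HasOneAt cs (s + 1) p := by
  constructor
  · rintro ⟨m, hm, rfl, h1⟩
    obtain ⟨m', rfl⟩ : ∃ m', m = m' + 1 := ⟨m - 1, by omega⟩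
    refine ⟨m', by simp at hm; omega, by push_cast; ring, ?_⟩
    simpa [List.get_eq_getElem] using h1
  · rintro ⟨m, hm, rfl, h1⟩
    refine ⟨m + 1, by simpa using Nat.succ_lt_succ hm, by push_cast; ring, ?_⟩
    simp only [List.get_eq_getElem] at h1 ⊢
    simpa [List.getElem_cons_succ] using h1

-- the fused scan of B, characterised: all remaining required positions hold '1' and the total count matches
theorem pvMatchesGo_iff (req : List Int) (k : Int) (c : List String) (s : Int) (j : Nat) (ones : Int)
    (hsorted : req.Pairwise (· < ·)) (hj : j ≤ req.length)
    (hlo : ∀ p ∈ req.drop j, s ≤ p) (hhi : ∀ p ∈ req.drop j, p < s + (c.length : Int)) :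
    pvMatchesGo req k (PySem.List.enumerate c s) j ones = true ↔
      ((∀ p ∈ req.drop j, HasOneAt c s p) ∧ ones + (c.countP (· == "1") : Int) = k) := by
  induction c generalizing s j ones with
  | nil =>
    have hdrop : req.drop j = [] := by
      cases hd : req.drop j with
      | nil => rfl
      | cons q t =>
        exfalso
        have h1 := hlo q (by rw [hd]; exact List.mem_cons_self)
        have h2 := hhi q (by rw [hd]; exact List.mem_cons_self)
        simp at h2; omega
    have hjlen : j = req.length := by
      have := List.drop_eq_nil_iff.mp hdrop; omega
    simp [PySem.List.enumerate, pvMatchesGo, hjlen]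
  | cons v cs ih =>
    rw [PySem.List.enumerate_cons]
    have hshift : ∀ t : List Int, (∀ p ∈ t, s + 1 ≤ p) → (∀ p ∈ t, p < s + ((v :: cs).length : Int)) →
        ((∀ p ∈ t, HasOneAt (v :: cs) s p) ↔ (∀ p ∈ t, HasOneAt cs (s + 1) p)) := by
      intro t h1 _
      exact forall₂_congr (fun p hp => hasOneAt_cons_shift v cs s p (by have := h1 p hp; omega))
    by_cases hhit : j < req.length ∧ req.getD j 0 = s
    · obtain ⟨hjlt, hreqj⟩ := hhit
      have hdropj : req.drop j = s :: req.drop (j + 1) := by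
        rw [List.drop_eq_getElem_cons hjlt, ← List.getD_eq_getElem req 0 hjlt, hreqj]
      have hgt : ∀ p ∈ req.drop (j + 1), s + 1 ≤ p := by
        intro p hp
        have hsub : [s, p].Sublist req := by
          have : [s, p].Sublist (req.drop j) := by
            rw [hdropj]; exact (List.singleton_sublist.mpr hp).cons₂ s
          exact this.trans (List.drop_sublist j req)
        have := List.pairwise_iff_forall_sublist.mp hsorted hsub; omega
      have hhi' : ∀ p ∈ req.drop (j + 1), p < s + 1 + (cs.length : Int) := by
        intro p hp
        have := hhi p (by rw [hdropj]; exact List.mem_cons_of_mem _ hp)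
        simp at this ⊢; omega
      by_cases hv : v = "1"
      · subst hv
        rw [pvMatchesGo]
        simp only [hreqj, hjlt]
        simp only [beq_self_eq_true, decide_true, Bool.true_and, if_true]
        rw [ih (s + 1) (j + 1) (ones + 1) hjlt hgt hhi']
        rw [hdropj]
        simp only [List.forall_mem_cons]
        rw [hshift (req.drop (j + 1)) hgt (fun p hp => hhi p (by rw [hdropj]; exact List.mem_cons_of_mem _ hp))]
        have hcnt : (("1" :: cs).countP (· == "1") : Int) = (cs.countP (· == "1") : Int) + 1 := by
          simp
        constructor
        · rintro ⟨hall, hk⟩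
          exact ⟨⟨(hasOneAt_cons_self "1" cs s).mpr rfl, hall⟩, by omega⟩
        · rintro ⟨⟨_, hall⟩, hk⟩
          exact ⟨hall, by omega⟩
      · rw [pvMatchesGo]
        simp only [hreqj, hjlt]
        have hvb : (v == "1") = false := by simpa using hv
        simp only [hvb, Bool.false_eq_true, if_false, beq_self_eq_true, decide_true, Bool.true_and, if_true]
        constructor
        · intro h; exact absurd h (by simp)
        · rintro ⟨hall, _⟩
          have := hall s (by rw [hdropj]; exact List.mem_cons_self)
          exact absurd ((hasOneAt_cons_self v cs s).mp this) hv
    · -- no hit: every remaining required position is ≥ s + 1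
      have hgt : ∀ p ∈ req.drop j, s + 1 ≤ p := by
        intro p hp
        cases hd : req.drop j with
        | nil => rw [hd] at hp; exact absurd hp (List.not_mem_nil)
        | cons q t =>
          have hjlt : j < req.length := by
            by_contra hge
            have : req.drop j = [] := List.drop_eq_nil_iff.mpr (by omega)
            rw [this] at hd; exact absurd hd (by simp)
          have hq : q = req[j] := by
            have := List.drop_eq_getElem_cons hjlt
            rw [hd] at this; exact (List.cons.injEq ..).mp this |>.1
          have hqs : q ≠ s := by
            intro he
            exact hhit ⟨hjlt, by rw [List.getD_eq_getElem req 0 hjlt, ← hq, he]⟩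
          have hqlo : s ≤ q := hlo q (by rw [hd]; exact List.mem_cons_self)
          rw [hd] at hp
          rcases List.mem_cons.mp hp with rfl | hpt
          · omega
          · have hsub : [q, p].Sublist req := by
              have : [q, p].Sublist (req.drop j) := by
                rw [hd]; exact (List.singleton_sublist.mpr hpt).cons₂ q
              exact this.trans (List.drop_sublist j req)
            have := List.pairwise_iff_forall_sublist.mp hsorted hsub; omega
      have hnohit : (decide (j < req.length) && (req.getD j 0 == s)) = false := by
        by_cases h1 : j < req.length
        · have h2 : req.getD j 0 ≠ s := fun he => hhit ⟨h1, he⟩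
          rw [List.getD_eq_getElem req 0 h1] at h2
          simp [h1, h2]
        · simp [h1]
      have hhi' : ∀ p ∈ req.drop j, p < s + 1 + (cs.length : Int) := by
        intro p hp; have := hhi p hp; simp at this ⊢; omega
      have hrec := ih (s + 1) j ones hj hgt hhi'
      have hsh := hshift (req.drop j) hgt hhi
      by_cases hv : v = "1"
      · subst hv
        rw [pvMatchesGo]
        simp only [beq_self_eq_true, if_true, hnohit, Bool.false_eq_true, if_false]
        rw [ih (s + 1) j (ones + 1) hj hgt hhi', hsh]
        have hcnt : (("1" :: cs).countP (· == "1") : Int) = (cs.countP (· == "1") : Int) + 1 := by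
          simp
        constructor
        · rintro ⟨hall, hk⟩; exact ⟨hall, by omega⟩
        · rintro ⟨hall, hk⟩; exact ⟨hall, by omega⟩
      · rw [pvMatchesGo]
        have hvb : (v == "1") = false := by simpa using hv
        simp only [hvb, Bool.false_eq_true, if_false, hnohit]
        rw [hrec, hsh]
        have hcnt : ((v :: cs).countP (· == "1") : Int) = (cs.countP (· == "1") : Int) := by
          simp [hvb]
        rw [hcnt]

-- every CARG position, as A computes it, is the Int cast of an in-range Nat index
theorem positions_bound (carg_node_list reference_coverage : List Int) (c : List String)
    (hmem : ∀ n ∈ carg_node_list, n ∈ reference_coverage)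
    (hlen : ∀ n ∈ carg_node_list, reference_coverage.idxOf n < c.length) :
    ∀ i ∈ carg_node_list.map (fun node_id =>
        (((PySem.List.index? reference_coverage node_id).getD 0 : Nat) : Int)),
      ∃ k : Nat, i = (k : Int) ∧ k < c.length := by
  intro i hi
  obtain ⟨n, hn, rfl⟩ := List.mem_map.mp hi
  refine ⟨(PySem.List.index? reference_coverage n).getD 0, rfl, ?_⟩
  have hsome : (PySem.List.index? reference_coverage n).isSome :=
    (PySem.List.index?_isSome_iff reference_coverage n).mpr (hmem n hn)
  obtain ⟨k, hk⟩ := Option.isSome_iff_exists.mp hsome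
  have hidx : reference_coverage.idxOf n = k := by
    rw [List.idxOf_eq_getD_idxOf?, ← PySem.List.index?_eq_idxOf?, hk]; rfl
  rw [hk]
  simpa [hidx] using hlen n hn

-- A's membership pass characterised (no range hypothesis needed: pyGet?.getD reads "" out of range)
theorem allA_iff (P : List Int) (c : List String) :
    ((P.map (fun index => if (PySem.List.pyGet? c index).getD "" == "1" then true else false)).all
        (fun b => b)) = true ↔ ∀ i ∈ P, (PySem.List.pyGet? c i).getD "" = "1" := by
  simp only [List.all_map, List.all_eq_true, Function.comp]
  refine forall₂_congr fun i _ => ?_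
  by_cases h : (PySem.List.pyGet? c i).getD "" = "1" <;> simp [h]

theorem pyGet_iff_hasOneAt (c : List String) (i : Int)
    (hin : ∃ k : Nat, i = (k : Int) ∧ k < c.length) :
    (PySem.List.pyGet? c i).getD "" = "1" ↔ HasOneAt c 0 i := by
  obtain ⟨k, rfl, hk⟩ := hin
  rw [PySem.List.pyGet?_natCast, List.getElem?_eq_getElem hk]
  constructor
  · intro h; exact ⟨k, hk, by simp, by simpa [List.get_eq_getElem] using h⟩
  · rintro ⟨m, hm, he, h1⟩
    have : m = k := by omega
    subst this; simpa [List.get_eq_getElem] using h1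

-- per coverage: A's two checks coincide with B's fused scan
theorem cond_eq (P : List Int) (c : List String)
    (hin : ∀ i ∈ P, ∃ k : Nat, i = (k : Int) ∧ k < c.length) :
    (((P.map (fun index => if (PySem.List.pyGet? c index).getD "" == "1" then true else false)).all
        (fun b => b))
      && ((c.foldl (fun s node => if node == "1" then s + 1 else s) (0 : Int)) == (P.length : Int)))
    = pvMatchesGo (PySem.List.sorted (PySem.Set.ofList P) (fun x => x) false) (P.length : Int)
        (PySem.List.enumerate c) 0 0 := by
  set req := PySem.List.sorted (PySem.Set.ofList P) (fun x => x) false with hreq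
  have hmemreq : ∀ p, p ∈ req ↔ p ∈ P := by
    intro p; rw [hreq, PySem.List.mem_sorted, PySem.Set.mem_ofList]
  have hsorted : req.Pairwise (· < ·) := PySem.List.sorted_ofList_pairwise_lt P
  have hlo : ∀ p ∈ req.drop 0, (0 : Int) ≤ p := by
    intro p hp
    obtain ⟨k, rfl, _⟩ := hin p ((hmemreq p).mp (by simpa using hp))
    positivity
  have hhi : ∀ p ∈ req.drop 0, p < 0 + (c.length : Int) := by
    intro p hp
    obtain ⟨k, rfl, hk⟩ := hin p ((hmemreq p).mp (by simpa using hp))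
    simp; exact_mod_cast hk
  rw [Bool.eq_iff_iff, Bool.and_eq_true,
    pvMatchesGo_iff req (P.length : Int) c 0 0 0 hsorted (Nat.zero_le _) hlo hhi]
  rw [allA_iff, PySem.List.foldl_count_if (fun x => x == "1") c 0]
  simp only [List.drop_zero, beq_iff_eq, zero_add]
  constructor
  · rintro ⟨hall, hk⟩
    exact ⟨fun p hp => (pyGet_iff_hasOneAt c p (hin p ((hmemreq p).mp hp))).mp
        (hall p ((hmemreq p).mp hp)), hk⟩
  · rintro ⟨hall, hk⟩
    exact ⟨fun p hp => (pyGet_iff_hasOneAt c p (hin p hp)).mpr (hall p ((hmemreq p).mpr hp)), hk⟩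

-- A's two-branch continue/append step, as one conditional append
theorem step_eq (b1 : Bool) (cnt klen : Int) (acc : List (List String)) (c : List String) :
    (if ¬ b1 then acc else if cnt ≠ klen then acc else acc ++ [c])
      = (if b1 && (cnt == klen) then acc ++ [c] else acc) := by
  cases b1 <;> by_cases h : cnt = klen <;> simp [h]

-- A's accumulating fold equals B's filter, coverage by coverage
theorem fold_eq (P : List Int) (covs : List (List String)) (acc : List (List String))
    (h : ∀ c ∈ covs, ∀ i ∈ P, ∃ k : Nat, i = (k : Int) ∧ k < c.length) :
    covs.foldl (fun carg_coverages coverage =>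
      if ¬ ((P.map (fun index =>
              if (PySem.List.pyGet? coverage index).getD "" == "1" then true else false)).all (fun b => b)) then
        carg_coverages
      else if (coverage.foldl (fun s node => if node == "1" then s + 1 else s) (0 : Int)) ≠ (P.length : Int) then
        carg_coverages
      else
        carg_coverages ++ [coverage]) acc
    = acc ++ covs.filter (fun c => pvMatchesGo (PySem.List.sorted (PySem.Set.ofList P) (fun x => x) false)
        (P.length : Int) (PySem.List.enumerate c) 0 0) := by
  induction covs generalizing acc with
  | nil => simp
  | cons c cs ih =>
    simp only [List.foldl_cons, List.filter_cons]
    rw [ih _ (fun c' hc' => h c' (List.mem_cons_of_mem _ hc'))]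
    rw [← cond_eq P c (h c List.mem_cons_self), step_eq]
    cases hb : (((P.map (fun index =>
          if (PySem.List.pyGet? c index).getD "" == "1" then true else false)).all (fun b => b))
        && ((c.foldl (fun s node => if node == "1" then s + 1 else s) (0 : Int)) == (P.length : Int))) with
    | true => simp
    | false => simp

-- ===== VERDICT (by name: the statement is the Claim_ definition above) =====
theorem find_carg_coverages_spec : Claim_equal_find_carg_coverages := by
  intro carg_node_list reference_coverage coverages _ hpre
  unfold Spec_find_carg_coverages
  unfold find_carg_coverages find_carg_coverages_alt
  simp only []
  rw [fold_eq _ _ _ (fun c hc =>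
    positions_bound carg_node_list reference_coverage c hpre.1 (fun n hn => hpre.2 c hc n hn))]
  simp [List.length_map]
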